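-- pv_equiv track=rewrite | github.com/MartinVeselyTul/CVUT_HCM_semestral | python_scripts/followers_increase.py | first_followers_count
-- ===== SOURCE A (Python) =====
-- def first_followers_count(data):
--     export_data = {}
--     for i in range(0, len(data), 3):
--         if data[i] not in export_data.keys():
--             export_data[data[i]] = data[i+1], data[i+2] #id: {followers, timestamp}
--         else:
--             if export_data[data[i]][1] > data[i+2]:
--                 export_data[data[i]] = data[i+1], data[i+2]
--     return export_data
-- ===== SOURCE B (Python) =====
-- def first_followers_count(data):
--     groups = {}
--     for i in range(0, len(data), 3):
--         groups[data[i]] = groups.get(data[i], []) + [(data[i + 1], data[i + 2])]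
--     return {k: min(v, key=lambda r: r[1]) for k, v in groups.items()}
-- ===== Notes on version B (the rewrite author's own statement) =====
-- stated objective: alternative
-- what changed: B first groups all (followers, timestamp) records per id into a dict of lists, then in a second pass maps each id to its first minimum-timestamp record via min(key=...), instead of A's single pass that conditionally overwrites the running best record.
import Mathlib
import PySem

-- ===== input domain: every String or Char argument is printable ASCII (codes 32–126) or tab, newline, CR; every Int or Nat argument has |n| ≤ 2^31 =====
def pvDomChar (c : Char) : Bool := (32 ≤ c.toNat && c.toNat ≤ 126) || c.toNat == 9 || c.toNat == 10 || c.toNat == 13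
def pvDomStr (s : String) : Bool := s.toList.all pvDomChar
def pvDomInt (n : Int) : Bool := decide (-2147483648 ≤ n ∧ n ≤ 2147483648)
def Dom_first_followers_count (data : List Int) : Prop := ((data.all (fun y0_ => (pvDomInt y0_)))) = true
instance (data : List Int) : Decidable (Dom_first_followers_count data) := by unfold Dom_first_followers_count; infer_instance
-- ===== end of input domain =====

-- B groups the (followers, timestamp) records per id first and then takes each id's
-- first minimum-timestamp record in a second pass (objective: alternative decomposition).

-- ===== PORT A =====
-- A's loop 'for i in range(0, len(data), 3)' reading data[i], data[i+1], data[i+2]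
-- is transcribed as structural recursion consuming three elements per step; under
-- Pre_ (length a multiple of 3) this visits exactly the indices A reads.
-- 'export_data[data[i]][1]' is read with getD (0, 0); the key is present in that branch.
def ffcLoopA : List Int → PySem.Dict Int (Int × Int) → PySem.Dict Int (Int × Int)
  | a :: b :: c :: rest, d =>
      if d.contains a = false then ffcLoopA rest (d.insert a (b, c))
      else if (d.getD a (0, 0)).2 > c then ffcLoopA rest (d.insert a (b, c))
      else ffcLoopA rest d
  | _, d => d

def first_followers_count (data : List Int) : List (Int × Int × Int) :=
  (ffcLoopA data PySem.Dict.empty).items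

-- ===== PORT B =====
-- min(v, key=lambda r: r[1]): first element with minimal second component.
-- B only ever applies it to nonempty lists; the [] case is unreachable (default (0, 0)).
def pyMinSnd : List (Int × Int) → (Int × Int)
  | [] => (0, 0)
  | h :: t => t.foldl (fun acc x => if x.2 < acc.2 then x else acc) h

def ffcLoopB : List Int → PySem.Dict Int (List (Int × Int)) → PySem.Dict Int (List (Int × Int))
  | a :: b :: c :: rest, g => ffcLoopB rest (g.insert a (g.getD a [] ++ [(b, c)]))
  | _, g => g

def first_followers_count_alt (data : List Int) : List (Int × Int × Int) :=
  ((ffcLoopB data PySem.Dict.empty).items).map (fun p => (p.1, pyMinSnd p.2))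

-- ===== PRECONDITION & SPEC =====
-- Python A raises IndexError (data[i+1] or data[i+2] past the end) unless len(data) is a multiple of 3.
def Pre_first_followers_count (data : List Int) : Prop := data.length % 3 = 0
instance (data : List Int) : Decidable (Pre_first_followers_count data) := by unfold Pre_first_followers_count; infer_instance
def pvWitness_first_followers_count : List Int := [1, 10, 5, 2, 7, 9, 1, 20, 3]
def Spec_first_followers_count (data : List Int) (out : List (Int × Int × Int)) : Prop := out = first_followers_count_alt data
instance (data : List Int) (out : List (Int × Int × Int)) : Decidable (Spec_first_followers_count data out) := by unfold Spec_first_followers_count; infer_instance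

-- ===== CLAIM (what is proved, stated in full; the proofs are below) =====
def Claim_equal_first_followers_count : Prop := ∀ (data : List Int), Dom_first_followers_count data → Pre_first_followers_count data → Spec_first_followers_count data (first_followers_count data)

-- ===== LEMMAS AND PROOFS =====

-- the value-abstraction relating B's state to A's state
def ffcMap (g : PySem.Dict Int (List (Int × Int))) : PySem.Dict Int (Int × Int) :=
  PySem.Dict.mk (g.items.map (fun p => (p.1, pyMinSnd p.2)))

lemma contains_ffcMap (g : PySem.Dict Int (List (Int × Int))) (a : Int) :
    (ffcMap g).contains a = g.contains a := by
  obtain ⟨l⟩ := g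
  induction l with
  | nil => rfl
  | cons p t ih =>
      simp only [ffcMap, List.map_cons] at *
      simp only [PySem.Dict.contains_mk] at *
      by_cases h : p.1 == a <;> simp [h, ih]

lemma get?_ffcMap (g : PySem.Dict Int (List (Int × Int))) (a : Int) :
    (ffcMap g).get? a = (g.get? a).map pyMinSnd := by
  obtain ⟨l⟩ := g
  induction l with
  | nil => rfl
  | cons p t ih =>
      simp only [ffcMap, List.map_cons] at *
      rw [PySem.Dict.get?_mk_cons, PySem.Dict.get?_mk_cons]
      by_cases h : p.1 == a <;> simp [h, ih]

lemma pyMinSnd_append_singleton (v : List (Int × Int)) (hv : v ≠ []) (e : Int × Int) :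
    pyMinSnd (v ++ [e]) = if e.2 < (pyMinSnd v).2 then e else pyMinSnd v := by
  obtain ⟨h, t, rfl⟩ := List.exists_cons_of_ne_nil hv
  simp [pyMinSnd, List.foldl_append]

lemma items_ffcMap (g : PySem.Dict Int (List (Int × Int))) :
    (ffcMap g).items = g.items.map (fun p => (p.1, pyMinSnd p.2)) := rfl

lemma ffcMap_insert_fresh (g : PySem.Dict Int (List (Int × Int))) (a : Int)
    (v : List (Int × Int)) (hc : g.contains a = false) :
    ffcMap (g.insert a v) = (ffcMap g).insert a (pyMinSnd v) := by
  have hcm : (ffcMap g).contains a = false := by rw [contains_ffcMap]; exact hc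
  apply PySem.Dict.ext
  rw [items_ffcMap, PySem.Dict.items_insert_of_not_contains _ _ hc,
      PySem.Dict.items_insert_of_not_contains _ _ hcm, items_ffcMap]
  simp

lemma ffcMap_insert_existing (g : PySem.Dict Int (List (Int × Int))) (a : Int)
    (v : List (Int × Int)) (hc : g.contains a = true) :
    ffcMap (g.insert a v) = (ffcMap g).insert a (pyMinSnd v) := by
  have hcm : (ffcMap g).contains a = true := by rw [contains_ffcMap]; exact hc
  apply PySem.Dict.ext
  rw [items_ffcMap, PySem.Dict.items_insert_of_contains _ _ hc,
      PySem.Dict.items_insert_of_contains _ _ hcm, items_ffcMap, List.map_map, List.map_map]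
  apply List.map_congr_left
  intro p _
  by_cases h : p.1 == a <;> simp [h, Function.comp]

-- replacing the unique entry at a present key by its own value is the identity
lemma insert_getD_self (d : PySem.Dict Int (Int × Int)) (a : Int)
    (hnd : d.keys.Nodup) (hc : d.contains a = true) :
    d.insert a (d.getD a (0, 0)) = d := by
  apply PySem.Dict.ext
  rw [PySem.Dict.items_insert_of_contains _ _ hc]
  have h : ∀ p ∈ d.items, (if (p.1 == a) = true then (a, d.getD a (0, 0)) else p) = p := by
    intro p hp
    by_cases h : p.1 == a
    · have ha : p.1 = a := by simpa using h
      have hv := PySem.Dict.getD_of_mem_items (d := d) (k := p.1) (v := p.2)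
        (by exact hp) hnd (0, 0)
      simp [← ha, hv]
    · simp [h]
  rw [List.map_congr_left h]; simp

lemma ffcLoop_invariant (rest : List Int) (g : PySem.Dict Int (List (Int × Int)))
    (hnd : g.keys.Nodup) (hne : ∀ p ∈ g.items, p.2 ≠ []) :
    ffcLoopA rest (ffcMap g) = ffcMap (ffcLoopB rest g) := by
  induction rest, g using ffcLoopB.induct with
  | case2 l g h =>
      cases l with
      | nil => rfl
      | cons a t => cases t with
          | nil => rfl
          | cons b t2 => cases t2 with
              | nil => rfl
              | cons c t3 => exact absurd rfl (h a b c t3)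
  | case1 a b c rest g ih =>
      rw [ffcLoopA, ffcLoopB]
      by_cases hc : g.contains a = true
      · -- key already present
        have hcm : (ffcMap g).contains a = true := by rw [contains_ffcMap]; exact hc
        have hvsome : ∃ v, g.get? a = some v := by
          rcases h : g.get? a with _ | v
          · rw [PySem.Dict.contains_eq_isSome_get?, h] at hc; simp at hc
          · exact ⟨v, rfl⟩
        obtain ⟨v, hv⟩ := hvsome
        have hvmem : (a, v) ∈ g.items := PySem.Dict.mem_items_of_get?_eq_some _ hv
        have hvne : v ≠ [] := hne _ hvmem
        have hgetD : g.getD a [] = v := PySem.Dict.getD_of_get?_eq_some _ _ hv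
        have hgetDm : (ffcMap g).getD a (0, 0) = pyMinSnd v :=
          PySem.Dict.getD_of_get?_eq_some _ _ (by rw [get?_ffcMap, hv]; rfl)
        have hnd' : (g.insert a (g.getD a [] ++ [(b, c)])).keys.Nodup :=
          PySem.Dict.nodup_keys_insert _ _ _ hnd
        have hne' : ∀ p ∈ (g.insert a (g.getD a [] ++ [(b, c)])).items, p.2 ≠ [] := by
          intro p hp
          rcases (PySem.Dict.mem_items_insert _ _ _ _).mp hp with h1 | ⟨h2, _⟩
          · subst h1; simp [hgetD]
          · exact hne _ h2
        rw [if_neg (by simp [hcm]), hgetDm, ← ih hnd' hne', hgetD,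
            ffcMap_insert_existing _ _ _ hc,
            pyMinSnd_append_singleton v hvne (b, c)]
        by_cases hlt : (pyMinSnd v).2 > c
        · have hbc : (b, c).2 < (pyMinSnd v).2 := hlt
          rw [if_pos hlt, if_pos hbc]
        · have hbc : ¬ (b, c).2 < (pyMinSnd v).2 := hlt
          rw [if_neg hlt, if_neg hbc, ← hgetDm,
              insert_getD_self _ _ (by
                have hk : (ffcMap g).keys = g.keys := by
                  simp only [ffcMap, PySem.Dict.keys]; rw [List.map_map]; rfl
                rw [hk]; exact hnd) hcm]
      · -- fresh key
        have hc' : g.contains a = false := by simpa using hc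
        have hcm : (ffcMap g).contains a = false := by rw [contains_ffcMap]; exact hc'
        have hgetD : g.getD a [] = [] := PySem.Dict.getD_of_not_contains _ _ hc'
        have hnd' : (g.insert a (g.getD a [] ++ [(b, c)])).keys.Nodup :=
          PySem.Dict.nodup_keys_insert _ _ _ hnd
        have hne' : ∀ p ∈ (g.insert a (g.getD a [] ++ [(b, c)])).items, p.2 ≠ [] := by
          intro p hp
          rcases (PySem.Dict.mem_items_insert _ _ _ _).mp hp with h1 | ⟨h2, _⟩
          · subst h1; simp [hgetD]
          · exact hne _ h2
        rw [if_pos hcm, ← ih hnd' hne', hgetD, ffcMap_insert_fresh _ _ _ hc']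
        rfl

-- ===== VERDICT (by name: the statement is the Claim_ definition above) =====
theorem first_followers_count_spec : Claim_equal_first_followers_count := by
  intro data _ _
  show first_followers_count data = first_followers_count_alt data
  unfold first_followers_count first_followers_count_alt
  have h := ffcLoop_invariant data PySem.Dict.empty PySem.Dict.nodup_keys_empty (by intro p hp; cases hp)
  have he : ffcMap PySem.Dict.empty = PySem.Dict.empty := rfl
  rw [he] at h
  rw [h]; rfl
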